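-- pv_equiv track=rewrite | github.com/jeranaias/alchemist | alchemist/standards/catalog.py | match_algorithm
-- ===== SOURCE A (Python) =====
-- _ALIASES: dict[str, str] = {
--     "adler": "adler32",
--     "adler32": "adler32",
--     "adler-32": "adler32",
--     "adler_32": "adler32",
--     "crc": "crc32",
--     "crc32": "crc32",
--     "crc-32": "crc32",
--     "crc_32": "crc32",
--     "crc32-ieee": "crc32",
--     "crc32_ieee": "crc32",
--     "deflate": "deflate",
--     "inflate": "deflate",
--     "zlib": "deflate",
--     "aes": "aes",
--     "aes-128": "aes128",
--     "aes128": "aes128",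
--     "aes-192": "aes192",
--     "aes192": "aes192",
--     "aes-256": "aes256",
--     "aes256": "aes256",
--     "sha": "sha256",
--     "sha1": "sha1",
--     "sha-1": "sha1",
--     "sha224": "sha224",
--     "sha-224": "sha224",
--     "sha256": "sha256",
--     "sha-256": "sha256",
--     "sha384": "sha384",
--     "sha-384": "sha384",
--     "sha512": "sha512",
--     "sha-512": "sha512",
--     "md5": "md5",
--     "md-5": "md5",
-- }
--
-- def match_algorithm(name: str) -> str | None:
--     """Map an extractor-supplied algorithm name to a canonical key."""
--     if not name:
--         return None
--     n = name.strip().lower().replace(" ", "_").replace("-", "_")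
--     # Try exact alias
--     if n in _ALIASES:
--         return _ALIASES[n]
--     # Try normalized variants
--     n2 = n.replace("_", "").replace("-", "")
--     if n2 in _ALIASES:
--         return _ALIASES[n2]
--     # Try prefix: `adler32_impl` → `adler32`
--     for alias, canonical in sorted(_ALIASES.items(), key=lambda x: -len(x[0])):
--         if n.startswith(alias):
--             return canonical
--     return None
-- ===== SOURCE B (Python) =====
-- # Alias table regrouped by canonical value; lookup scans the groups,
-- # and the prefix fallback peels one character at a time instead of
-- # sorting all alias entries per call.
-- _GROUPS: list[tuple[str, tuple[str, ...]]] = [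
--     ("adler32", ("adler", "adler32", "adler-32", "adler_32")),
--     ("crc32", ("crc", "crc32", "crc-32", "crc_32", "crc32-ieee", "crc32_ieee")),
--     ("deflate", ("deflate", "inflate", "zlib")),
--     ("aes", ("aes",)),
--     ("aes128", ("aes-128", "aes128")),
--     ("aes192", ("aes-192", "aes192")),
--     ("aes256", ("aes-256", "aes256")),
--     ("sha256", ("sha", "sha256", "sha-256")),
--     ("sha1", ("sha1", "sha-1")),
--     ("sha224", ("sha224", "sha-224")),
--     ("sha384", ("sha384", "sha-384")),
--     ("sha512", ("sha512", "sha-512")),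
--     ("md5", ("md5", "md-5")),
-- ]
--
--
-- def _lookup(key: str) -> str | None:
--     for canonical, aliases in _GROUPS:
--         if key in aliases:
--             return canonical
--     return None
--
--
-- def _longest_alias_prefix(p: str) -> str | None:
--     # longest known-alias prefix of p, found by peeling the last character
--     while p:
--         hit = _lookup(p)
--         if hit is not None:
--             return hit
--         p = p[:-1]
--     return None
--
--
-- def match_algorithm(name: str) -> str | None:
--     """Map an extractor-supplied algorithm name to a canonical key."""
--     if not name:
--         return None
--     n = name.strip().lower().replace(" ", "_").replace("-", "_")
--     hit = _lookup(n) or _lookup(n.replace("_", "").replace("-", ""))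
--     if hit is not None:
--         return hit
--     return _longest_alias_prefix(n[:-1])
-- ===== Notes on version B (the rewrite author's own statement) =====
-- stated objective: alternative
-- what changed: B stores the table grouped by canonical value and scans groups for membership instead of a flat dict, and replaces A's per-call sort-and-scan prefix fallback by a loop that peels one trailing character at a time, returning the first (hence longest) prefix that is a known alias.
import Mathlib
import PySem

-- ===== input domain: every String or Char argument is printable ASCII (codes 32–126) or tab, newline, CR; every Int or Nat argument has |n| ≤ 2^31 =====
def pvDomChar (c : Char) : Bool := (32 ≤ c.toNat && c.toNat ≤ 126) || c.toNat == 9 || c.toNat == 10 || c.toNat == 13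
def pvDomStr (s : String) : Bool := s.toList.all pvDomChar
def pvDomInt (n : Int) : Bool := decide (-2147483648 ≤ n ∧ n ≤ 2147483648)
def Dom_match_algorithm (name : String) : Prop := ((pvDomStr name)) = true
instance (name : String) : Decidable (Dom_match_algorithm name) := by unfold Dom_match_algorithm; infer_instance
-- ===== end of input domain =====

-- B regroups the alias table by canonical value (lookup = scan the groups for membership)
-- and replaces A's per-call sort-and-scan prefix fallback by peeling one trailing
-- character at a time (objective: alternative; no sort, no flat dict).

-- ===== PORT A =====
-- the module-level _ALIASES dict (keys as char lists, values as canonical strings)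
def pvAliasPairs : List (List Char × String) :=
  [("adler".toList, "adler32"), ("adler32".toList, "adler32"), ("adler-32".toList, "adler32"),
   ("adler_32".toList, "adler32"), ("crc".toList, "crc32"), ("crc32".toList, "crc32"),
   ("crc-32".toList, "crc32"), ("crc_32".toList, "crc32"), ("crc32-ieee".toList, "crc32"),
   ("crc32_ieee".toList, "crc32"), ("deflate".toList, "deflate"), ("inflate".toList, "deflate"),
   ("zlib".toList, "deflate"), ("aes".toList, "aes"), ("aes-128".toList, "aes128"),
   ("aes128".toList, "aes128"), ("aes-192".toList, "aes192"), ("aes192".toList, "aes192"),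
   ("aes-256".toList, "aes256"), ("aes256".toList, "aes256"), ("sha".toList, "sha256"),
   ("sha1".toList, "sha1"), ("sha-1".toList, "sha1"), ("sha224".toList, "sha224"),
   ("sha-224".toList, "sha224"), ("sha256".toList, "sha256"), ("sha-256".toList, "sha256"),
   ("sha384".toList, "sha384"), ("sha-384".toList, "sha384"), ("sha512".toList, "sha512"),
   ("sha-512".toList, "sha512"), ("md5".toList, "md5"), ("md-5".toList, "md5")]

def pvAliases : PySem.Dict (List Char) String := PySem.Dict.ofList pvAliasPairs

-- n = name.strip().lower().replace(" ", "_").replace("-", "_")  (the normalization line)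
def pvNormalize (cs : List Char) : List Char :=
  PySem.Chars.replace (PySem.Chars.replace (PySem.Chars.lower (PySem.Chars.strip cs)) [' '] ['_']) ['-'] ['_']

-- n2 = n.replace("_", "").replace("-", "")
def pvNormalize2 (n : List Char) : List Char :=
  PySem.Chars.replace (PySem.Chars.replace n ['_'] []) ['-'] []

-- 'if k in _ALIASES: return _ALIASES[k]' and otherwise fall through to the rest
def pvLookupOr (key : List Char) (rest : Option String) : Option String :=
  (pvAliases.get? key).or rest

def match_algorithm (name : String) : Option String :=
  if name.toList = [] then none
  else
    pvLookupOr (pvNormalize name.toList)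
      (pvLookupOr (pvNormalize2 (pvNormalize name.toList))
        ((PySem.List.sorted pvAliases.items (fun x => -((x.1.length : Int))) false).findSome?
          (fun p => if PySem.Chars.startswith (pvNormalize name.toList) p.1 then some p.2
                    else none)))

-- ===== PORT B =====
-- _GROUPS: canonical value, then the tuple of alias spellings mapping to it
def pvGroups : List (String × List (List Char)) :=
  [("adler32", ["adler".toList, "adler32".toList, "adler-32".toList, "adler_32".toList]),
   ("crc32", ["crc".toList, "crc32".toList, "crc-32".toList, "crc_32".toList,
              "crc32-ieee".toList, "crc32_ieee".toList]),
   ("deflate", ["deflate".toList, "inflate".toList, "zlib".toList]),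
   ("aes", ["aes".toList]),
   ("aes128", ["aes-128".toList, "aes128".toList]),
   ("aes192", ["aes-192".toList, "aes192".toList]),
   ("aes256", ["aes-256".toList, "aes256".toList]),
   ("sha256", ["sha".toList, "sha256".toList, "sha-256".toList]),
   ("sha1", ["sha1".toList, "sha-1".toList]),
   ("sha224", ["sha224".toList, "sha-224".toList]),
   ("sha384", ["sha384".toList, "sha-384".toList]),
   ("sha512", ["sha512".toList, "sha-512".toList]),
   ("md5", ["md5".toList, "md-5".toList])]

-- _lookup: for canonical, aliases in _GROUPS: if key in aliases: return canonical
def pvbLookup (key : List Char) : Option String :=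
  pvGroups.findSome? (fun g => if key ∈ g.2 then some g.1 else none)

-- _longest_alias_prefix: while p: hit = _lookup(p); if hit: return hit; p = p[:-1]
-- (Python p[:-1] on a nonempty string is exactly List.dropLast)
def pvbLongest (p : List Char) : Option String :=
  if h : p = [] then none
  else
    match pvbLookup p with
    | some v => some v
    | none => pvbLongest p.dropLast
termination_by p.length
decreasing_by
  have : p.length ≠ 0 := fun h0 => h (List.length_eq_zero_iff.mp h0)
  simp [List.length_dropLast]; omega

def match_algorithm_alt (name : String) : Option String :=
  if name.toList = [] then none
  else
    -- n = name.strip().lower().replace(" ", "_").replace("-", "_")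
    let n := PySem.Chars.replace
      (PySem.Chars.replace (PySem.Chars.lower (PySem.Chars.strip name.toList)) [' '] ['_'])
      ['-'] ['_']
    -- hit = _lookup(n) or _lookup(n.replace("_", "").replace("-", ""))  (canonicals are never "")
    match (pvbLookup n).or
        (pvbLookup (PySem.Chars.replace (PySem.Chars.replace n ['_'] []) ['-'] [])) with
    | some v => some v
    | none => pvbLongest n.dropLast   -- _longest_alias_prefix(n[:-1])

-- ===== PRECONDITION & SPEC =====
def Spec_match_algorithm (name : String) (out : Option String) : Prop := out = match_algorithm_alt name
instance (name : String) (out : Option String) : Decidable (Spec_match_algorithm name out) := by unfold Spec_match_algorithm; infer_instance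

-- ===== CLAIM (what is proved, stated in full; the proofs are below) =====
def Claim_equal_match_algorithm : Prop := ∀ (name : String), Dom_match_algorithm name → Spec_match_algorithm name (match_algorithm name)

-- ===== LEMMAS AND PROOFS =====
set_option maxRecDepth 100000

-- the probe function of A's final loop
def pvProbe (n : List Char) (p : List Char × String) : Option String :=
  if PySem.Chars.startswith n p.1 then some p.2 else none

-- the flat key list of the table
def pvKeyList : List (List Char) := pvAliasPairs.map (·.1)

lemma pvAliases_keys_nodup : pvAliases.keys.Nodup := by decide

lemma pvAliases_key_len_pos : ∀ p ∈ pvAliases.items, 1 ≤ p.1.length := by decide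

-- B's group lookup agrees with A's dict lookup (both first-match, keys unique)
lemma pvbLookup_eq_get? (k : List Char) : pvbLookup k = pvAliases.get? k := by
  by_cases hk : k ∈ pvKeyList
  · revert hk
    have : ∀ k' ∈ pvKeyList, pvbLookup k' = pvAliases.get? k' := by decide
    exact this k
  · have h1 : pvbLookup k = none := by
      rw [pvbLookup, List.findSome?_eq_none_iff]
      intro g hg
      rw [if_neg]
      intro hmem
      have hall : pvGroups.all (fun g => g.2.all (fun a => decide (a ∈ pvKeyList))) = true := by
        decide
      rw [List.all_eq_true] at hall
      have := hall g hg
      rw [List.all_eq_true] at this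
      exact hk (of_decide_eq_true (this k hmem))
    have h2 : pvAliases.get? k = none := by
      cases hget : pvAliases.get? k with
      | none => rfl
      | some v =>
        exact absurd
          (by
            have hit := PySem.Dict.mem_items_of_get?_eq_some pvAliases hget
            have hmk := PySem.Dict.mem_keys_of_mem_items (d := pvAliases) (p := (k, v)) hit
            have hkeys : pvAliases.keys = pvKeyList := by decide
            rwa [hkeys] at hmk)
          hk
    rw [h1, h2]

-- findSome? over a list in which at most one element can yield `some`
lemma pv_findSome?_eq_of_unique {α β : Type} (g : α → Option β) (l : List α) (x : α)
    (hx : x ∈ l) (h : ∀ y ∈ l, (g y).isSome → y = x) : l.findSome? g = g x := by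
  induction l with
  | nil => cases hx
  | cons a t ih =>
    by_cases ha : (g a).isSome
    · have hax : a = x := h a (List.mem_cons_self) ha
      subst hax
      obtain ⟨v, hv⟩ := Option.isSome_iff_exists.mp ha
      simp [List.findSome?, hv]
    · have hga : g a = none := Option.not_isSome_iff_eq_none.mp ha
      rcases List.mem_cons.mp hx with rfl | hx'
      · rw [hga]
        simp only [List.findSome?, hga]
        rw [List.findSome?_eq_none_iff]
        intro y hy
        by_contra hne
        have := h y (List.mem_cons_of_mem _ hy) (Option.isSome_iff_ne_none.mpr hne)
        subst this
        exact hne hga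
      · simp only [List.findSome?, hga]
        exact ih hx' (fun y hy => h y (List.mem_cons_of_mem _ hy))

-- dropping elements on which the probe is none does not change findSome?
lemma pv_findSome?_filter {α β : Type} (g : α → Option β) (q : α → Bool) (l : List α)
    (h : ∀ p ∈ l, q p = false → g p = none) :
    l.findSome? g = (l.filter q).findSome? g := by
  induction l with
  | nil => rfl
  | cons a t ih =>
    have ht := ih (fun p hp => h p (List.mem_cons_of_mem _ hp))
    by_cases hq : q a
    · simp only [List.filter_cons, hq, if_pos trivial, List.findSome?]
      cases g a <;> simp [ht]
    · have : g a = none := h a List.mem_cons_self (Bool.not_eq_true _ ▸ by simpa using hq)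
      simp only [List.filter_cons, Bool.not_eq_true] at *
      simp [List.findSome?, this, ht, hq]

-- on a length-descending list, filter (≤ k+1) splits as filter (= k+1) ++ filter (≤ k)
lemma pv_filter_split {α : Type} (f : α → Nat) (k : Nat) (l : List α)
    (h : l.Pairwise (fun a b => f b ≤ f a)) :
    l.filter (fun p => f p ≤ k + 1) =
      l.filter (fun p => f p = k + 1) ++ l.filter (fun p => f p ≤ k) := by
  induction l with
  | nil => rfl
  | cons a t ih =>
    obtain ⟨hpw, hpt⟩ := List.pairwise_cons.mp h
    have ht := ih hpt
    rcases Nat.lt_trichotomy (f a) (k + 1) with hlt | heq | hgt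
    · have hnone : t.filter (fun p => f p = k + 1) = [] := by
        rw [List.filter_eq_nil_iff]
        intro x hx
        have := hpw x hx
        simp only [decide_eq_true_eq]
        omega
      simp [show f a ≤ k + 1 by omega, show ¬ f a = k + 1 by omega,
        show f a ≤ k by omega, ht, hnone]
    · simp [heq, ht]
    · simp [show ¬ f a ≤ k + 1 by omega, show ¬ f a = k + 1 by omega,
        show ¬ f a ≤ k by omega, ht]

-- the one-length slab of A's scan IS the dict lookup of the prefix of that length
lemma pv_slab_eq_lookup (n : List Char) (k : Nat) (hk : k + 1 ≤ n.length)
    (L : List (List Char × String)) (hperm : L.Perm pvAliases.items) :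
    (L.filter (fun p => p.1.length = k + 1)).findSome? (pvProbe n) =
      pvAliases.get? (n.take (k + 1)) := by
  have hmemL : ∀ p, p ∈ L ↔ p ∈ pvAliases.items := fun p => hperm.mem_iff
  have hkeylen : (n.take (k + 1)).length = k + 1 := by
    simp [List.length_take]; omega
  cases hget : pvAliases.get? (n.take (k + 1)) with
  | none =>
    rw [List.findSome?_eq_none_iff]
    intro y hy
    obtain ⟨hyL, hylen⟩ := List.mem_filter.mp hy
    simp only [decide_eq_true_eq] at hylen
    unfold pvProbe
    rw [if_neg]
    intro hsw
    have hpre : y.1 <+: n := (PySem.Chars.startswith_iff n y.1).mp hsw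
    have hy1 : y.1 = n.take (k + 1) := by
      rw [List.prefix_iff_eq_take.mp hpre, hylen]
    have hsome : pvAliases.get? y.1 = some y.2 :=
      PySem.Dict.get?_of_mem_items pvAliases (by simpa using (hmemL y).mp hyL)
        pvAliases_keys_nodup
    rw [hy1, hget] at hsome
    cases hsome
  | some v =>
    have hmem : (n.take (k + 1), v) ∈ pvAliases.items :=
      PySem.Dict.mem_items_of_get?_eq_some pvAliases hget
    have hxL : (n.take (k + 1), v) ∈ L.filter (fun p => p.1.length = k + 1) :=
      List.mem_filter.mpr ⟨(hmemL _).mpr hmem, by simp [hkeylen]⟩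
    rw [pv_findSome?_eq_of_unique (pvProbe n) _ (n.take (k + 1), v) hxL]
    · unfold pvProbe
      rw [if_pos ((PySem.Chars.startswith_iff n _).mpr (List.take_prefix _ _))]
    · intro y hy hys
      obtain ⟨hyL, hylen⟩ := List.mem_filter.mp hy
      simp only [decide_eq_true_eq] at hylen
      unfold pvProbe at hys
      by_cases hsw : PySem.Chars.startswith n y.1
      · have hpre : y.1 <+: n := (PySem.Chars.startswith_iff n y.1).mp hsw
        have hy1 : y.1 = n.take (k + 1) := by
          rw [List.prefix_iff_eq_take.mp hpre, hylen]
        exact List.inj_on_of_nodup_map pvAliases_keys_nodup ((hmemL y).mp hyL) hmem hy1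
      · rw [if_neg hsw] at hys; simp at hys

-- B's character-peeling loop, started on a prefix of n, equals A's scan restricted
-- to aliases of length ≤ that prefix's length
lemma pv_longest_eq_filter (n : List Char) (L : List (List Char × String))
    (hperm : L.Perm pvAliases.items)
    (hpw : L.Pairwise (fun a b => b.1.length ≤ a.1.length)) :
    ∀ k, k ≤ n.length →
      pvbLongest (n.take k) = (L.filter (fun p => p.1.length ≤ k)).findSome? (pvProbe n) := by
  intro k
  induction k with
  | zero =>
    intro _
    have h0 : L.filter (fun p => p.1.length ≤ 0) = [] := by
      rw [List.filter_eq_nil_iff]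
      intro x hx
      have := pvAliases_key_len_pos x (hperm.mem_iff.mp hx)
      simp only [decide_eq_true_eq]
      omega
    rw [h0, List.take_zero, pvbLongest, List.findSome?_nil]
    rfl
  | succ k ih =>
    intro hk
    have hlt : (n.take (k + 1)).length = k + 1 := by
      simp [List.length_take]; omega
    have hne : n.take (k + 1) ≠ [] := by
      intro h
      rw [h] at hlt
      simp at hlt
    have hdrop : (n.take (k + 1)).dropLast = n.take k := by
      rw [List.dropLast_eq_take, List.length_take, List.take_take]
      congr 1
      omega
    rw [pv_filter_split (fun p => p.1.length) k L hpw, List.findSome?_append,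
      pv_slab_eq_lookup n k hk L hperm, ← ih (by omega), ← hdrop]
    rw [pvbLongest]
    rw [dif_neg hne, pvbLookup_eq_get?, hdrop]
    cases pvAliases.get? (n.take (k + 1)) <;> simp

-- when the exact lookup failed, A's whole sorted scan equals B's peeling loop on n[:-1]
lemma pv_scan_eq_longest (n : List Char) (h0 : pvAliases.get? n = none) :
    (PySem.List.sorted pvAliases.items (fun x => -((x.1.length : Int))) false).findSome?
        (fun p => if PySem.Chars.startswith n p.1 then some p.2 else none) =
      pvbLongest n.dropLast := by
  set key : (List Char × String) → Int := fun x => -((x.1.length : Int)) with hkey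
  set L := PySem.List.sorted pvAliases.items key false with hL
  have hperm : L.Perm pvAliases.items := PySem.List.sorted_perm _ _ _
  have hpw : L.Pairwise (fun a b => b.1.length ≤ a.1.length) := by
    have := PySem.List.sorted_pairwise (xs := pvAliases.items) (key := key)
    refine this.imp ?_
    intro a b h
    simp only [hkey] at h
    omega
  have hfilter : L.findSome? (pvProbe n) =
      (L.filter (fun p => p.1.length ≤ n.length - 1)).findSome? (pvProbe n) := by
    apply pv_findSome?_filter
    intro p hp hq
    simp only [decide_eq_false_iff_not] at hq
    unfold pvProbe
    rw [if_neg]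
    intro hsw
    have hpre : p.1 <+: n := (PySem.Chars.startswith_iff n p.1).mp hsw
    have h1 : p.1.length ≤ n.length := hpre.length_le
    have h2 : 1 ≤ p.1.length := pvAliases_key_len_pos p (hperm.mem_iff.mp hp)
    have hlen : p.1.length = n.length := by omega
    have hp1 : p.1 = n := hpre.eq_of_length hlen
    have : pvAliases.get? n = some p.2 := by
      rw [← hp1]
      exact PySem.Dict.get?_of_mem_items pvAliases (hperm.mem_iff.mp hp) pvAliases_keys_nodup
    rw [h0] at this
    cases this
  have hdl : n.dropLast = n.take (n.length - 1) := List.dropLast_eq_take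
  calc L.findSome? (fun p => if PySem.Chars.startswith n p.1 then some p.2 else none)
      = L.findSome? (pvProbe n) := rfl
    _ = (L.filter (fun p => p.1.length ≤ n.length - 1)).findSome? (pvProbe n) := hfilter
    _ = pvbLongest (n.take (n.length - 1)) :=
        (pv_longest_eq_filter n L hperm hpw _ (by omega)).symm
    _ = pvbLongest n.dropLast := by rw [hdl]

-- ===== VERDICT (by name: the statement is the Claim_ definition above) =====
theorem match_algorithm_spec : Claim_equal_match_algorithm := by
  intro name _
  unfold Spec_match_algorithm match_algorithm match_algorithm_alt
  by_cases hnil : name.toList = []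
  · simp [hnil]
  · rw [if_neg hnil, if_neg hnil]
    simp only [pvLookupOr, pvbLookup_eq_get?]
    set n := pvNormalize name.toList with hn
    have hn' : PySem.Chars.replace
        (PySem.Chars.replace (PySem.Chars.lower (PySem.Chars.strip name.toList)) [' '] ['_'])
        ['-'] ['_'] = n := rfl
    rw [hn']
    have hn2 : PySem.Chars.replace (PySem.Chars.replace n ['_'] []) ['-'] [] =
        pvNormalize2 n := rfl
    rw [hn2]
    cases h1 : pvAliases.get? n with
    | some v => simp
    | none =>
      cases h2 : pvAliases.get? (pvNormalize2 n) with
      | some v => simp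
      | none => simp [pv_scan_eq_longest n h1]
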